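-- pv_equiv track=rewrite | github.com/2022-AI-project/Johoon_s_Source | Fill_color.py | line_effect
-- ===== SOURCE A (Python) =====
-- def line_effect(seg_img, color_img, value, n):
--     for i in range(len(seg_img)):
--         for j in range(len(seg_img[0])):
--             for l in range(n):
--                 if i + l > 298:
--                     pass
--                 else:
--                     if seg_img[i][j] == 0 and seg_img[i+l][j] != 0 and seg_img[i+l][j] != 1:
--                         for k in range(3):
--                             if color_img[i+l][j][k] - value < 0:
--                                 color_img[i+l][j][k] = 0
--                             else:
--                                 color_img[i+l][j][k] -= value
--                 if j - l <= 0: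
--                     pass
--                 else:
--                     if seg_img[i][j] == 0 and seg_img[i][j-l] != 0 and seg_img[i][j-l] != 1:
--                         for k in range(3):
--                             if color_img[i][j-l][k] - value < 0:
--                                 color_img[i][j-l][k] = 0
--                             else:
--                                 color_img[i][j-l][k] -= value
--     return color_img
-- ===== SOURCE B (Python) =====
-- def _prefix_zeros(xs):
--     p = [0]
--     acc = 0
--     for v in xs:
--         if v == 0:
--             acc += 1
--         p.append(acc)
--     return p
--
--
-- def line_effect(seg_img, color_img, value, n):
--     H = len(seg_img)
--     if H == 0 or n <= 0:
--         return color_img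
--     W = len(seg_img[0])
--     rowpref = [_prefix_zeros(row[:W]) for row in seg_img]
--     # rows past index 298 never receive vertical darkening (hard cap of the
--     # effect), so column prefixes are only needed for the first 299 rows
--     vrows = seg_img[:299]
--     colpref = [_prefix_zeros([row[c] for row in vrows]) for c in range(W)]
--     for r, row in enumerate(seg_img):
--         for c, v in enumerate(row[:W]):
--             if v == 0 or v == 1:
--                 continue
--             t = 0
--             if r <= 298:
--                 lo = max(r - n + 1, 0)
--                 t += colpref[c][r + 1] - colpref[c][lo]
--             if c >= 1:
--                 hi = min(c + n, W)
--                 t += rowpref[r][hi] - rowpref[r][c]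
--             if t != 0:
--                 px = color_img[r][c]
--                 for k in range(3):
--                     x = px[k]
--                     for _ in range(t):
--                         x = max(x - value, 0)
--                     px[k] = x
--     return color_img
-- ===== Notes on version B (the rewrite author's own statement) =====
-- stated objective: faster
-- what changed: Replaces A's per-source scatter (triple loop over i,j,l re-darkening neighbours one step at a time for every zero pixel) by a gather: per-row/per-column prefix sums of zero counts give each affected pixel its total hit count t in O(1), and the t clamped subtractions are applied directly to that pixel only.
import Mathlib
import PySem

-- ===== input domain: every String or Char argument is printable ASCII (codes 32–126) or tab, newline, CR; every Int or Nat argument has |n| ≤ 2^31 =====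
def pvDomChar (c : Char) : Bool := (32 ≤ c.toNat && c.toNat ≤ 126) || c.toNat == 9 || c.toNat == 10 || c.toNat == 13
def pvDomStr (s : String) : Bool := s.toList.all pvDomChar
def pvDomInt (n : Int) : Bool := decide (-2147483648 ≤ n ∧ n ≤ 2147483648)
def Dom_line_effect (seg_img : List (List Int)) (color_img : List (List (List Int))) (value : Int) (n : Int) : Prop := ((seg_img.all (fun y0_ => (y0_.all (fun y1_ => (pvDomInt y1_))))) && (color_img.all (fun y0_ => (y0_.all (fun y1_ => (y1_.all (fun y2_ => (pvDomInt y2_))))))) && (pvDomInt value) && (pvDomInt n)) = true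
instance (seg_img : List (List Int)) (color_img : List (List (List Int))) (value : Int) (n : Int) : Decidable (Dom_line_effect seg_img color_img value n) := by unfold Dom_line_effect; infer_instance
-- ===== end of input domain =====

-- B replaces A's per-source scatter of n darkening passes (triple loop over i,j,l) by a gather:
-- per-row/per-column prefix sums of zero counts give each pixel its hit count t, then the t
-- clamped subtractions are applied directly to that pixel (rows past index 298 never receive
-- vertical darkening, so column prefixes cover only the first 299 rows).
-- Both A and B mutate color_img in place and return it; the equivalence proved here is about
-- the RETURN value.

-- ===== PORT A =====
-- the k-loop body: one clamped subtraction on a channel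
def pvF (value x : Int) : Int := if x - value < 0 then 0 else x - value

-- xs[i] = f(xs[i]) for 0 ≤ i < len xs (exact there; Python raises out of range — excluded by Pre_;
-- the guard only keeps the function total, A never writes a negative index)
def pvSetIdx {α : Type} (xs : List α) (i : Int) (f : α → α) : List α :=
  if i < 0 then xs else xs.modify i.toNat f

-- seg_img[i][j] (exact for in-range indices, which Pre_ guarantees at every use)
def pvSegAt (seg : List (List Int)) (i j : Int) : Int :=
  PySem.List.pyGetD (PySem.List.pyGetD seg i []) j 0

-- 'for k in range(3): clamped subtraction on px[k]'
def pvUpd3 (value : Int) (px : List Int) : List Int :=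
  (PySem.List.pyRange 0 3 1).foldl (fun px k => pvSetIdx px k (pvF value)) px

-- the darkening of pixel (r, c) of the image
def pvUpd (value : Int) (img : List (List (List Int))) (r c : Int) : List (List (List Int)) :=
  pvSetIdx img r (fun row => pvSetIdx row c (pvUpd3 value))

def line_effect (seg_img : List (List Int)) (color_img : List (List (List Int))) (value : Int) (n : Int) : List (List (List Int)) :=
  (PySem.List.pyRange 0 seg_img.length 1).foldl (fun img i =>
    (PySem.List.pyRange 0 ((PySem.List.pyGetD seg_img 0 []).length : Int) 1).foldl (fun img j =>
      (PySem.List.pyRange 0 n 1).foldl (fun img l =>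
        let img1 := if 298 < i + l then img
          else if pvSegAt seg_img i j = 0 ∧ pvSegAt seg_img (i+l) j ≠ 0 ∧ pvSegAt seg_img (i+l) j ≠ 1
            then pvUpd value img (i+l) j else img
        if j - l ≤ 0 then img1
        else if pvSegAt seg_img i j = 0 ∧ pvSegAt seg_img i (j-l) ≠ 0 ∧ pvSegAt seg_img i (j-l) ≠ 1
          then pvUpd value img1 i (j-l) else img1) img) img) color_img

-- ===== PORT B =====
-- Source B's _prefix_zeros: running count of zeros, collected with append
def pvPrefixZeros (xs : List Int) : List Int :=
  (xs.foldl (fun (s : Int × List Int) v =>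
      ((if v = 0 then s.1 + 1 else s.1), s.2 ++ [if v = 0 then s.1 + 1 else s.1]))
    ((0 : Int), [(0 : Int)])).2

-- 'x = px[k]; for _ in range(t): x = max(x - value, 0); px[k] = x'
def pvChan (t value x : Int) : Int :=
  (PySem.List.pyRange 0 t 1).foldl (fun x _ => max (x - value) 0) x

-- 'for k in range(3): …'
def pvUpdPx (t value : Int) (px : List Int) : List Int :=
  (PySem.List.pyRange 0 3 1).foldl (fun px k => pvSetIdx px k (pvChan t value)) px

def line_effect_alt (seg_img : List (List Int)) (color_img : List (List (List Int))) (value : Int) (n : Int) : List (List (List Int)) :=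
  if seg_img.length = 0 ∨ n ≤ 0 then color_img else
  let W : Int := ((PySem.List.pyGetD seg_img 0 []).length : Int)
  let rowpref := seg_img.map (fun row => pvPrefixZeros (PySem.List.slice row none (some W)))
  let vrows := PySem.List.slice seg_img none (some 299)
  let colpref := (PySem.List.pyRange 0 W 1).map (fun c =>
      pvPrefixZeros (vrows.map (fun row => PySem.List.pyGetD row c 0)))
  (PySem.List.enumerate seg_img 0).foldl (fun img rrow =>
    (PySem.List.enumerate (PySem.List.slice rrow.2 none (some W)) 0).foldl (fun img cv =>
      if cv.2 = 0 ∨ cv.2 = 1 then img else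
      let cp := PySem.List.pyGetD colpref cv.1 []
      let t1 : Int := if rrow.1 ≤ 298 then
          PySem.List.pyGetD cp (rrow.1 + 1) 0 - PySem.List.pyGetD cp (max (rrow.1 - n + 1) 0) 0 else 0
      let rp := PySem.List.pyGetD rowpref rrow.1 []
      let t : Int := t1 + (if 1 ≤ cv.1 then
          PySem.List.pyGetD rp (min (cv.1 + n) W) 0 - PySem.List.pyGetD rp cv.1 0 else 0)
      if t = 0 then img
      else pvSetIdx img rrow.1 (fun row => pvSetIdx row cv.1 (pvUpdPx t value))) img) color_img

-- ===== PRECONDITION & SPEC =====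
-- Pre_ = A's no-crash condition: either the loops never run (n ≤ 0 or no rows), or every seg row
-- among the first 299 reaches the width len(seg_img[0]) A scans (later rows are only read at
-- columns ≥ 1, so a short row there is allowed when that width is ≤ 1), no zero pixel makes A
-- read a seg row past the end (the 298-capped vertical reach stays inside), and color_img
-- carries a ≥ 3-channel pixel at every position that actually gets darkened (a 'hit').
-- pixel (r, c) gets darkened by A (a 'hit'): its seg value is outside {0,1} and a zero seg pixel
-- lies within reach n below it (capped at row 298) or to its right
def pvHitAt (seg_img : List (List Int)) (n : Int) (r c : Nat) : Prop :=
  (seg_img.getD r []).getD c 0 ≠ 0 ∧ (seg_img.getD r []).getD c 0 ≠ 1 ∧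
  (((r : Int) ≤ 298 ∧ ∃ i < r + 1,
      ((r : Int) - n < (i : Int) ∧ (seg_img.getD i []).getD c 0 = 0)) ∨
   (1 ≤ c ∧ ∃ j < (seg_img.getD 0 []).length,
      (c ≤ j ∧ (j : Int) < (c : Int) + n ∧ (seg_img.getD r []).getD j 0 = 0)))

def Pre_line_effect (seg_img : List (List Int)) (color_img : List (List (List Int))) (value : Int) (n : Int) : Prop :=
  n ≤ 0 ∨ seg_img = [] ∨
  ((∀ i < min seg_img.length 299, (seg_img.getD 0 []).length ≤ (seg_img.getD i []).length) ∧
   (∀ i, 299 ≤ i → i < seg_img.length →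
      ((seg_img.getD 0 []).length ≤ (seg_img.getD i []).length ∨ (seg_img.getD 0 []).length ≤ 1)) ∧
   (∀ i < seg_img.length, ∀ j < (seg_img.getD 0 []).length,
      (seg_img.getD i []).getD j 0 = 0 →
        ((i : Int) + n - 1 < (seg_img.length : Int) ∨ 298 < (seg_img.length : Int))) ∧
   (∀ r < seg_img.length, ∀ c < (seg_img.getD 0 []).length, pvHitAt seg_img n r c →
      (r < color_img.length ∧ c < (color_img.getD r []).length ∧
        3 ≤ ((color_img.getD r []).getD c []).length)))
instance (seg_img : List (List Int)) (color_img : List (List (List Int))) (value : Int) (n : Int) : Decidable (Pre_line_effect seg_img color_img value n) := by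
  unfold Pre_line_effect
  letI : ∀ (r c : Nat), Decidable (pvHitAt seg_img n r c) := fun r c => by
    unfold pvHitAt; infer_instance
  infer_instance

def pvWitness_line_effect : List (List Int) × List (List (List Int)) × Int × Int :=
  ([[0, 0], [2, 3]], [[[10, 10, 10], [5, 5, 5]], [[1, 2, 3], [4, 5, 6]]], 3, 2)

def Spec_line_effect (seg_img : List (List Int)) (color_img : List (List (List Int))) (value : Int) (n : Int) (out : List (List (List Int))) : Prop := out = line_effect_alt seg_img color_img value n
instance (seg_img : List (List Int)) (color_img : List (List (List Int))) (value : Int) (n : Int) (out : List (List (List Int))) : Decidable (Spec_line_effect seg_img color_img value n out) := by unfold Spec_line_effect; infer_instance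

-- ===== CLAIM (what is proved, stated in full; the proofs are below) =====
def Claim_equal_line_effect : Prop := ∀ (seg_img : List (List Int)) (color_img : List (List (List Int))) (value : Int) (n : Int), Dom_line_effect seg_img color_img value n → Pre_line_effect seg_img color_img value n → Spec_line_effect seg_img color_img value n (line_effect seg_img color_img value n)


-- ===== LEMMAS AND PROOFS =====

-- The update A performs on the image, as a function of one target coordinate pair
def pvUpdF (value : Int) : List (List (List Int)) → (Int × Int) → List (List (List Int)) :=
  fun img rc => pvUpd value img rc.1 rc.2

-- the (multi-)set of coordinates A darkens, with multiplicity, in A's order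
def pvVT (seg : List (List Int)) (i j l : Int) : List (Int × Int) :=
  if 298 < i + l then []
  else if pvSegAt seg i j = 0 ∧ pvSegAt seg (i+l) j ≠ 0 ∧ pvSegAt seg (i+l) j ≠ 1
    then [(i+l, j)] else []

def pvHT (seg : List (List Int)) (i j l : Int) : List (Int × Int) :=
  if j - l ≤ 0 then []
  else if pvSegAt seg i j = 0 ∧ pvSegAt seg i (j-l) ≠ 0 ∧ pvSegAt seg i (j-l) ≠ 1
    then [(i, j-l)] else []

def pvTargets (seg : List (List Int)) (W n : Int) : List (Int × Int) :=
  (PySem.List.pyRange 0 seg.length 1).flatMap (fun i =>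
    (PySem.List.pyRange 0 W 1).flatMap (fun j =>
      (PySem.List.pyRange 0 n 1).flatMap (fun l => pvVT seg i j l ++ pvHT seg i j l)))

lemma pv_body_eq (seg : List (List Int)) (value : Int) (img : List (List (List Int))) (i j l : Int) :
    (let img1 := if 298 < i + l then img
        else if pvSegAt seg i j = 0 ∧ pvSegAt seg (i+l) j ≠ 0 ∧ pvSegAt seg (i+l) j ≠ 1
          then pvUpd value img (i+l) j else img
      if j - l ≤ 0 then img1
      else if pvSegAt seg i j = 0 ∧ pvSegAt seg i (j-l) ≠ 0 ∧ pvSegAt seg i (j-l) ≠ 1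
        then pvUpd value img1 i (j-l) else img1)
    = (pvVT seg i j l ++ pvHT seg i j l).foldl (pvUpdF value) img := by
  simp only [pvVT, pvHT, List.foldl_append]
  split_ifs <;> simp [pvUpdF, List.foldl]

lemma pvA_eq_fold (seg : List (List Int)) (color : List (List (List Int))) (value n : Int) :
    line_effect seg color value n
      = (pvTargets seg ((PySem.List.pyGetD seg 0 []).length : Int) n).foldl (pvUpdF value) color := by
  unfold line_effect pvTargets
  simp only [List.foldl_flatMap, pv_body_eq]

-- pointwise view of the image
def pxAt (img : List (List (List Int))) (r c : Nat) : List Int := (img.getD r []).getD c []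

lemma pvUpd3_nil (value : Int) : pvUpd3 value [] = [] := rfl

lemma pvSetIdx_length {a : Type} (xs : List a) (i : Int) (f : a → a) :
    (pvSetIdx xs i f).length = xs.length := by
  unfold pvSetIdx; split_ifs <;> simp

lemma pvSetIdx_getD {a : Type} (xs : List a) (i : Int) (f : a → a) (k : Nat) (d : a)
    (hd : f d = d) :
    (pvSetIdx xs i f).getD k d = if i = (k : Int) then f (xs.getD k d) else xs.getD k d := by
  unfold pvSetIdx
  by_cases hi : i < 0
  · rw [if_pos hi, if_neg (by omega)]
  · rw [if_neg hi, List.getD_eq_getElem?_getD, List.getElem?_modify, List.getD_eq_getElem?_getD]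
    by_cases hik : i = (k : Int)
    · have ht : i.toNat = k := by omega
      cases h : xs[k]? <;> simp [h, ht, hik, hd]
    · have ht : i.toNat ≠ k := by omega
      cases h : xs[k]? <;> simp [h, ht, hik]

lemma pvSetIdx_nil {a : Type} (i : Int) (f : a → a) : pvSetIdx [] i f = [] := by
  unfold pvSetIdx; split_ifs <;> simp

lemma pvUpd_getD (value : Int) (img : List (List (List Int))) (a b : Int) (r : Nat) :
    (pvUpd value img a b).getD r []
      = if a = (r : Int) then pvSetIdx (img.getD r []) b (pvUpd3 value) else img.getD r [] := by
  unfold pvUpd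
  exact pvSetIdx_getD img a _ r [] (pvSetIdx_nil b (pvUpd3 value))

lemma pxAt_upd (value : Int) (img : List (List (List Int))) (a b : Int) (r c : Nat) :
    pxAt (pvUpd value img a b) r c
      = if a = (r : Int) ∧ b = (c : Int) then pvUpd3 value (pxAt img r c) else pxAt img r c := by
  unfold pxAt
  rw [pvUpd_getD]
  by_cases har : a = (r : Int)
  · rw [if_pos har, pvSetIdx_getD _ _ _ _ _ (pvUpd3_nil value)]
    by_cases hbc : b = (c : Int)
    · rw [if_pos hbc, if_pos ⟨har, hbc⟩]
    · rw [if_neg hbc, if_neg (by tauto)]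
  · rw [if_neg har, if_neg (by tauto)]

lemma pv_fold_pxAt (value : Int) (L : List (Int × Int)) :
    ∀ (img : List (List (List Int))) (r c : Nat),
      pxAt (L.foldl (pvUpdF value) img) r c
        = (pvUpd3 value)^[L.count ((r : Int), (c : Int))] (pxAt img r c) := by
  induction L with
  | nil => intro img r c; simp
  | cons t L ih =>
    intro img r c
    rw [List.foldl_cons, List.count_cons, ih]
    simp only [show pvUpdF value img t = pvUpd value img t.1 t.2 from rfl,
      pxAt_upd value img t.1 t.2 r c]
    by_cases h : t.1 = (r : Int) ∧ t.2 = (c : Int)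
    · rw [if_pos h, ← Function.iterate_succ_apply]
      have hbeq : (t == ((r : Int), (c : Int))) = true := by
        cases t; simp only [beq_iff_eq, Prod.mk.injEq]; simp_all
      rw [hbeq]
      simp
    · rw [if_neg h]
      have hbeq : (t == ((r : Int), (c : Int))) = false := by
        cases t; simp only [beq_eq_false_iff_ne, ne_eq, Prod.mk.injEq]; simp_all
      rw [hbeq]
      simp

lemma pv_fold_length (value : Int) (L : List (Int × Int)) (img : List (List (List Int))) :
    (L.foldl (pvUpdF value) img).length = img.length := by
  induction L generalizing img with
  | nil => rfl
  | cons t L ih => rw [List.foldl_cons, ih]; simp [pvUpdF, pvUpd, pvSetIdx_length]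

lemma pv_fold_rowlen (value : Int) (L : List (Int × Int)) (img : List (List (List Int))) (r : Nat) :
    ((L.foldl (pvUpdF value) img).getD r []).length = (img.getD r []).length := by
  induction L generalizing img with
  | nil => rfl
  | cons t L ih =>
    rw [List.foldl_cons, ih]
    rw [show pvUpdF value img t = pvUpd value img t.1 t.2 from rfl, pvUpd_getD]
    split_ifs <;> simp [pvSetIdx_length]

-- ===== counting =====

lemma pv_count_flatMap {a b : Type} [BEq b] (l : List a) (f : a → List b) (x : b) :
    (l.flatMap f).count x = (l.map (fun e => (f e).count x)).sum := by
  simp [List.count, List.countP_flatMap]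
  rfl

lemma pv_sum_pyRange_aux (f : Int → Nat) :
    ∀ (k : Nat) (a b : Int), b - a = (k : Int) →
      ((PySem.List.pyRange a b 1).map f).sum = ∑ i ∈ Finset.Ico a b, f i := by
  intro k
  induction k with
  | zero =>
    intro a b h
    rw [PySem.List.pyRange_one_eq_nil (by omega), Finset.Ico_eq_empty (by omega)]
    simp
  | succ k ih =>
    intro a b h
    have hb : b = (b - 1) + 1 := by omega
    rw [hb, PySem.List.pyRange_one_succ_right (by omega),
        ← Finset.insert_Ico_right_eq_Ico_add_one (by omega),
        Finset.sum_insert (by simp), List.map_append, List.sum_append, ih a (b - 1) (by omega)]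
    simp [Nat.add_comm]

lemma pv_sum_pyRange (a b : Int) (f : Int → Nat) :
    ((PySem.List.pyRange a b 1).map f).sum = ∑ i ∈ Finset.Ico a b, f i := by
  by_cases hab : b ≤ a
  · rw [PySem.List.pyRange_one_eq_nil hab, Finset.Ico_eq_empty (by omega)]
    simp
  · exact pv_sum_pyRange_aux f (b - a).toNat a b (by omega)

lemma pv_countP_pyRange (a b : Int) (z : Int → Prop) [DecidablePred z] :
    (PySem.List.pyRange a b 1).countP (fun i => decide (z i))
      = ∑ i ∈ Finset.Ico a b, if z i then (1 : Nat) else 0 := by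
  rw [← pv_sum_pyRange a b (fun i => if z i then (1 : Nat) else 0),
      show (fun i => if z i then (1 : Nat) else 0) = (fun i => if (fun i => decide (z i)) i then (1 : Nat) else 0) from by funext i; simp,
      PySem.List.sum_map_ite_one_zero_nat]

lemma pv_count_vT (seg : List (List Int)) (r c : Nat) (i j l : Int) :
    (pvVT seg i j l).count ((r : Int), (c : Int))
      = if (l = (r : Int) - i ∧ j = (c : Int) ∧ ((r : Int) ≤ 298 ∧ pvSegAt seg i (c : Int) = 0 ∧
            pvSegAt seg (r : Int) (c : Int) ≠ 0 ∧ pvSegAt seg (r : Int) (c : Int) ≠ 1)) then 1 else 0 := by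
  unfold pvVT
  by_cases hl : l = (r : Int) - i
  · have hil : i + l = (r : Int) := by omega
    rw [hil]
    by_cases hj : j = (c : Int)
    · subst hj
      split_ifs with h1 h2 <;>
        simp_all [List.count_cons, Prod.ext_iff] <;> omega
    · split_ifs with h1 h2 <;>
        simp_all [List.count_cons, Prod.ext_iff, eq_comm]
  · have hil : i + l ≠ (r : Int) := by omega
    split_ifs with h1 h2 <;>
      simp_all [List.count_cons, Prod.ext_iff, eq_comm]

lemma pv_count_hT (seg : List (List Int)) (r c : Nat) (i j l : Int) :
    (pvHT seg i j l).count ((r : Int), (c : Int))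
      = if (i = (r : Int) ∧ l = j - (c : Int) ∧ (0 < (c : Int) ∧ pvSegAt seg (r : Int) j = 0 ∧
            pvSegAt seg (r : Int) (c : Int) ≠ 0 ∧ pvSegAt seg (r : Int) (c : Int) ≠ 1)) then 1 else 0 := by
  unfold pvHT
  by_cases hl : l = j - (c : Int)
  · have hjl : j - l = (c : Int) := by omega
    rw [hjl]
    by_cases hi : i = (r : Int)
    · subst hi
      split_ifs with h1 h2 <;>
        simp_all [List.count_cons, Prod.ext_iff] <;> omega
    · split_ifs with h1 h2 <;>
        simp_all [List.count_cons, Prod.ext_iff, eq_comm]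
  · have hjl : j - l ≠ (c : Int) := by omega
    split_ifs with h1 h2 <;>
      simp_all [List.count_cons, Prod.ext_iff, eq_comm]

lemma pv_count_targets (seg : List (List Int)) (n W : Int) (r c : Nat)
    (hr : r < seg.length) (hc : (c : Int) < W) (hn : 1 ≤ n) :
    (pvTargets seg W n).count ((r : Int), (c : Int)) =
      (if pvSegAt seg (r : Int) (c : Int) ≠ 0 ∧ pvSegAt seg (r : Int) (c : Int) ≠ 1 then
        (if (r : Int) ≤ 298 then
            (PySem.List.pyRange (max ((r : Int) - n + 1) 0) ((r : Int) + 1) 1).countP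
              (fun i => decide (pvSegAt seg i (c : Int) = 0)) else 0)
        + (if 0 < (c : Int) then
            (PySem.List.pyRange (c : Int) (min ((c : Int) + n) W) 1).countP
              (fun j => decide (pvSegAt seg (r : Int) j = 0)) else 0)
      else 0) := by
  unfold pvTargets
  simp only [pv_count_flatMap, List.count_append, pv_count_vT seg r c, pv_count_hT seg r c,
    pv_sum_pyRange, Finset.sum_add_distrib]
  by_cases hC : pvSegAt seg (r : Int) (c : Int) ≠ 0 ∧ pvSegAt seg (r : Int) (c : Int) ≠ 1
  · rw [if_pos hC]
    congr 1
    · -- vertical part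
      by_cases h298 : (r : Int) ≤ 298
      · rw [if_pos h298, pv_countP_pyRange]
        simp only [ite_and, Finset.sum_ite_eq' (Finset.Ico (0 : Int) n),
          ← Finset.ite_sum_zero, Finset.mem_Ico,
          Finset.sum_ite_eq' (Finset.Ico (0 : Int) W) ((c : Int))]
        have hsub : Finset.Ico (max ((r : Int) - n + 1) 0) ((r : Int) + 1)
            ⊆ Finset.Ico (0 : Int) (seg.length : Int) := by
          intro x hx
          simp only [Finset.mem_Ico] at hx ⊢
          constructor
          · omega
          · have : (r : Int) < (seg.length : Int) := by exact_mod_cast hr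
            omega
        apply (Finset.sum_subset_zero_on_sdiff hsub ?_ ?_).symm
        · intro x hx
          simp only [Finset.mem_sdiff, Finset.mem_Ico] at hx
          split_ifs <;> first | rfl | omega
        · intro x hx
          simp only [Finset.mem_Ico] at hx
          rw [if_pos (show (0 : Int) ≤ (r : Int) - x by omega),
              if_pos (show (r : Int) - x < n by omega),
              if_pos (show (0 : Int) ≤ (c : Int) by omega), if_pos hc, if_pos h298]
          by_cases hz : pvSegAt seg x (c : Int) = 0 <;> simp [hz, hC.1, hC.2]
      · rw [if_neg h298]
        apply Finset.sum_eq_zero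
        intro i _
        apply Finset.sum_eq_zero
        intro j _
        apply Finset.sum_eq_zero
        intro l _
        rw [if_neg (by tauto)]
    · -- horizontal part
      by_cases hc1 : 0 < (c : Int)
      · rw [if_pos hc1, pv_countP_pyRange]
        simp only [ite_and, Finset.sum_ite_eq' (Finset.Ico (0 : Int) n),
          ← Finset.ite_sum_zero, Finset.mem_Ico,
          Finset.sum_ite_eq' (Finset.Ico (0 : Int) (seg.length : Int)) ((r : Int))]
        rw [if_pos (show (0 : Int) ≤ (r : Int) by omega),
            if_pos (show (r : Int) < (seg.length : Int) by exact_mod_cast hr)]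
        have hsub : Finset.Ico ((c : Int)) (min ((c : Int) + n) W)
            ⊆ Finset.Ico (0 : Int) W := by
          intro x hx
          simp only [Finset.mem_Ico] at hx ⊢
          omega
        apply (Finset.sum_subset_zero_on_sdiff hsub ?_ ?_).symm
        · intro x hx
          simp only [Finset.mem_sdiff, Finset.mem_Ico] at hx
          split_ifs <;> first | rfl | omega
        · intro x hx
          simp only [Finset.mem_Ico] at hx
          rw [if_pos (show (0 : Int) ≤ x - (c : Int) by omega),
              if_pos (show x - (c : Int) < n by omega), if_pos hc1]
          by_cases hz : pvSegAt seg (r : Int) x = 0 <;> simp [hz, hC.1, hC.2]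
      · rw [if_neg hc1]
        apply Finset.sum_eq_zero
        intro i _
        apply Finset.sum_eq_zero
        intro j _
        apply Finset.sum_eq_zero
        intro l _
        rw [if_neg (by tauto)]
  · rw [if_neg hC]
    refine Nat.add_eq_zero.mpr ⟨?_, ?_⟩ <;>
      · apply Finset.sum_eq_zero
        intro i _
        apply Finset.sum_eq_zero
        intro j _
        apply Finset.sum_eq_zero
        intro l _
        rw [if_neg (by tauto)]

-- ===== B-side evaluation =====

lemma pv_foldl_pair_snd (xs : List Int) :
    ∀ (a : Int) (acc : List Int),
      (xs.foldl (fun (s : Int × List Int) v =>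
          ((if v = 0 then s.1 + 1 else s.1), s.2 ++ [if v = 0 then s.1 + 1 else s.1])) (a, acc)).2
        = acc ++ (List.scanl (fun a v => if v = 0 then a + 1 else a) a xs).tail := by
  induction xs with
  | nil => intro a acc; simp [List.scanl]
  | cons x xs ih =>
    intro a acc
    rw [List.foldl_cons, ih]
    cases xs <;> simp [List.scanl]

lemma pvPrefixZeros_eq_scanl (xs : List Int) :
    pvPrefixZeros xs = List.scanl (fun a v => if v = 0 then a + 1 else a) 0 xs := by
  unfold pvPrefixZeros
  rw [pv_foldl_pair_snd]
  cases xs <;> simp [List.scanl]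

lemma pv_scanl_getD (xs : List Int) :
    ∀ (k : Nat), k ≤ xs.length → ∀ a : Int,
      (List.scanl (fun a v => if v = 0 then a + 1 else a) a xs).getD k 0
        = a + ((xs.take k).countP (fun v => v == 0) : Int) := by
  induction xs with
  | nil =>
    intro k hk a
    have hk0 : k = 0 := by simpa using hk
    subst hk0
    simp [List.scanl]
  | cons x xs ih =>
    intro k hk a
    cases k with
    | zero => simp [List.scanl_cons]
    | succ k =>
      rw [List.scanl_cons]
      simp only [List.getD_cons_succ]
      rw [ih k (by simpa using hk)]
      simp only [List.take_succ_cons, List.countP_cons]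
      by_cases hx : x = 0 <;> simp [hx] <;> push_cast <;> ring

-- value of pvPrefixZeros at index k
lemma pvPrefixZeros_getD (xs : List Int) (k : Nat) (hk : k ≤ xs.length) :
    PySem.List.pyGetD (pvPrefixZeros xs) (k : Int) 0 = ((xs.take k).countP (fun v => v == 0) : Int) := by
  rw [PySem.List.pyGetD_natCast, pvPrefixZeros_eq_scanl, pv_scanl_getD xs k hk 0, zero_add]

-- ===== the per-channel loop =====

-- one step of B's loop is A's clamped subtraction
lemma pv_step_eq_pvF (value x : Int) : max (x - value) 0 = pvF value x := by
  unfold pvF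
  split_ifs <;> omega

-- 'for _ in range(t)' over a constant step is function iteration
lemma pv_fold_const_iterate (f : Int → Int) (N : Nat) (x : Int) :
    (PySem.List.pyRange 0 (N : Int) 1).foldl (fun x _ => f x) x = f^[N] x := by
  induction N generalizing x with
  | zero => rw [PySem.List.pyRange_one_eq_nil (by omega)]; rfl
  | succ N ih =>
    rw [Nat.cast_add, Nat.cast_one,
      PySem.List.pyRange_one_succ_right (by omega), List.foldl_append, ih,
      Function.iterate_succ_apply']
    rfl

lemma pvChan_eq_iterate (value : Int) (N : Nat) (x : Int) :
    pvChan (N : Int) value x = (pvF value)^[N] x := by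
  unfold pvChan
  rw [show (fun (x : Int) (_ : Int) => max (x - value) 0)
      = (fun (x : Int) (_ : Int) => pvF value x) from by
        funext x _; exact pv_step_eq_pvF value x]
  exact pv_fold_const_iterate (pvF value) N x

-- ===== assembly helpers =====

lemma pvSegAt_getD (seg : List (List Int)) (i j : Int) (hi : 0 ≤ i) (hj : 0 ≤ j) :
    pvSegAt seg i j = (seg.getD i.toNat []).getD j.toNat 0 := by
  unfold pvSegAt
  rw [PySem.List.pyGetD_of_nonneg _ _ hi, PySem.List.pyGetD_of_nonneg _ _ hj]

lemma pv_targets_nil_of (seg : List (List Int)) (W n : Int) (h : n ≤ 0 ∨ seg = []) :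
    pvTargets seg W n = [] := by
  unfold pvTargets
  rcases h with h | h
  · simp [PySem.List.pyRange_one_eq_nil h]
  · subst h
    rfl

lemma pv_targets_bound (seg : List (List Int)) (n : Int)
    (hzero : ∀ i < seg.length, ∀ j < (seg.getD 0 []).length,
      (seg.getD i []).getD j 0 = 0 →
        ((i : Int) + n - 1 < (seg.length : Int) ∨ 298 < (seg.length : Int))) :
    ∀ t ∈ pvTargets seg ((seg.getD 0 []).length : Int) n,
      ∃ (rt ct : Nat), t = ((rt : Int), (ct : Int)) ∧ rt < seg.length ∧ ct < (seg.getD 0 []).length := by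
  intro t ht
  unfold pvTargets at ht
  simp only [List.mem_flatMap, PySem.List.mem_pyRange_one, List.mem_append] at ht
  obtain ⟨i, ⟨hi0, hiH⟩, j, ⟨hj0, hjW⟩, l, ⟨hl0, hln⟩, ht⟩ := ht
  rcases ht with ht | ht
  · unfold pvVT at ht
    split_ifs at ht with h1 h2
    · exact absurd ht List.not_mem_nil
    · simp only [List.mem_singleton] at ht
      subst ht
      have hz : (seg.getD i.toNat []).getD j.toNat 0 = 0 := by
        rw [← pvSegAt_getD seg i j hi0 hj0]; exact h2.1
      have hd := hzero i.toNat (by omega) j.toNat (by omega) hz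
      refine ⟨(i + l).toNat, j.toNat, ?_, by omega, by omega⟩
      simp [Int.toNat_of_nonneg (by omega : (0:Int) ≤ i + l),
        Int.toNat_of_nonneg hj0]
    · exact absurd ht List.not_mem_nil
  · unfold pvHT at ht
    split_ifs at ht with h1 h2
    · exact absurd ht List.not_mem_nil
    · simp only [List.mem_singleton] at ht
      subst ht
      refine ⟨i.toNat, (j - l).toNat, ?_, by omega, by omega⟩
      simp [Int.toNat_of_nonneg hi0, Int.toNat_of_nonneg (by omega : (0:Int) ≤ j - l)]
    · exact absurd ht List.not_mem_nil

lemma pv_count_zero_outside (seg : List (List Int)) (n : Int)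
    (hzero : ∀ i < seg.length, ∀ j < (seg.getD 0 []).length,
      (seg.getD i []).getD j 0 = 0 →
        ((i : Int) + n - 1 < (seg.length : Int) ∨ 298 < (seg.length : Int)))
    (r c : Nat) (h : seg.length ≤ r ∨ (seg.getD 0 []).length ≤ c) :
    (pvTargets seg ((seg.getD 0 []).length : Int) n).count ((r : Int), (c : Int)) = 0 := by
  rw [List.count_eq_zero]
  intro hmem
  obtain ⟨rt, ct, heq, hrt, hct⟩ := pv_targets_bound seg n hzero _ hmem
  have : rt = r ∧ ct = c := by
    rw [Prod.ext_iff] at heq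
    constructor <;> omega
  omega

lemma pv_countP_take_eq (xs : List Int) (k : Nat) (hk : k ≤ xs.length) :
    (xs.take k).countP (fun v => v == 0)
      = (PySem.List.pyRange 0 (k : Int) 1).countP (fun j => decide (PySem.List.pyGetD xs j 0 = 0)) := by
  conv_lhs => rw [← PySem.List.map_pyGetD_pyRange_zero' (xs.take k) 0]
  rw [List.countP_map, List.length_take, min_eq_left hk]
  apply List.countP_congr
  intro x hx
  simp only [Function.comp_apply]
  rw [PySem.List.mem_pyRange_one] at hx
  have hlt : x.toNat < k := by omega
  rw [PySem.List.pyGetD_of_nonneg (List.take k xs) _ hx.1,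
      PySem.List.pyGetD_of_nonneg xs _ hx.1,
      List.getD_eq_getElem?_getD, List.getD_eq_getElem?_getD,
      List.getElem?_take_of_lt hlt]
  simp

lemma pv_countP_window (z : Int → Bool) (lo hi : Int) (h0 : 0 ≤ lo) (hlh : lo ≤ hi) :
    (PySem.List.pyRange 0 hi 1).countP z
      = (PySem.List.pyRange 0 lo 1).countP z + (PySem.List.pyRange lo hi 1).countP z := by
  rw [PySem.List.pyRange_one_append 0 lo hi h0 hlh, List.countP_append]

lemma pv_upd3_cons (value p0 p1 p2 : Int) (rest : List Int) :
    pvUpd3 value (p0 :: p1 :: p2 :: rest)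
      = pvF value p0 :: pvF value p1 :: pvF value p2 :: rest := by
  rfl

lemma pv_upd3_iterate (value : Int) (t : Nat) (p0 p1 p2 : Int) (rest : List Int) :
    (pvUpd3 value)^[t] (p0 :: p1 :: p2 :: rest)
      = (pvF value)^[t] p0 :: (pvF value)^[t] p1 :: (pvF value)^[t] p2 :: rest := by
  induction t generalizing p0 p1 p2 with
  | zero => rfl
  | succ t ih =>
    rw [Function.iterate_succ_apply, pv_upd3_cons, ih,
      Function.iterate_succ_apply, Function.iterate_succ_apply, Function.iterate_succ_apply]

lemma pv_list_eq_of_getD {a : Type} (L1 L2 : List a) (d : a)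
    (hlen : L1.length = L2.length) (h : ∀ k : Nat, L1.getD k d = L2.getD k d) : L1 = L2 := by
  apply List.ext_getElem hlen
  intro k h1 h2
  have hk := h k
  rwa [List.getD_eq_getElem?_getD, List.getD_eq_getElem?_getD,
    List.getElem?_eq_getElem h1, List.getElem?_eq_getElem h2, Option.getD_some,
    Option.getD_some] at hk

-- ===== main assembly =====

lemma pxAt_def (img : List (List (List Int))) (r c : Nat) :
    ((img.getD r []).getD c []) = pxAt img r c := rfl

lemma pv_slice_take {a : Type} (xs : List a) (k : Nat) :
    PySem.List.slice xs none (some (k : Int)) = xs.take k := by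
  simp [pysem]

lemma pv_pref_window (xs : List Int) (lo hi : Int) (h0 : 0 ≤ lo) (hlh : lo ≤ hi)
    (hhi : hi ≤ (xs.length : Int)) :
    PySem.List.pyGetD (pvPrefixZeros xs) hi 0 - PySem.List.pyGetD (pvPrefixZeros xs) lo 0
      = ((PySem.List.pyRange lo hi 1).countP
          (fun j => decide (PySem.List.pyGetD xs j 0 = 0)) : Int) := by
  have hlo' : lo = ((lo.toNat : Nat) : Int) := (Int.toNat_of_nonneg h0).symm
  have hhi' : hi = ((hi.toNat : Nat) : Int) := (Int.toNat_of_nonneg (by omega)).symm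
  rw [hlo', hhi', pvPrefixZeros_getD xs hi.toNat (by omega),
    pvPrefixZeros_getD xs lo.toNat (by omega),
    pv_countP_take_eq xs hi.toNat (by omega), pv_countP_take_eq xs lo.toNat (by omega)]
  rw [← hlo', ← hhi']
  rw [pv_countP_window _ lo hi h0 hlh]
  push_cast
  ring

lemma pv_getD_map {a b : Type} (L : List a) (f : a → List b) (r : Nat)
    (hr : r < L.length) (d : a) :
    (L.map f).getD r [] = f (L.getD r d) := by
  rw [List.getD_eq_getElem?_getD, List.getElem?_map, List.getElem?_eq_getElem hr,
    List.getD_eq_getElem?_getD, List.getElem?_eq_getElem hr]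
  rfl

-- the hit count B computes for pixel (r, c): vertical window from the truncated column
-- prefixes plus horizontal window from the row prefixes (matches the port's let-bound lookups)
def pvT (seg : List (List Int)) (n : Int) (r c : Int) : Int :=
  (if r ≤ 298 then
      PySem.List.pyGetD (PySem.List.pyGetD
          ((PySem.List.pyRange 0 ((PySem.List.pyGetD seg 0 []).length : Int) 1).map (fun c' =>
            pvPrefixZeros ((PySem.List.slice seg none (some 299)).map
              (fun row => PySem.List.pyGetD row c' 0))))
          c []) (r + 1) 0
      - PySem.List.pyGetD (PySem.List.pyGetD
          ((PySem.List.pyRange 0 ((PySem.List.pyGetD seg 0 []).length : Int) 1).map (fun c' =>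
            pvPrefixZeros ((PySem.List.slice seg none (some 299)).map
              (fun row => PySem.List.pyGetD row c' 0))))
          c []) (max (r - n + 1) 0) 0
    else 0)
  + (if 1 ≤ c then
      PySem.List.pyGetD (PySem.List.pyGetD
          (seg.map (fun row => pvPrefixZeros (PySem.List.slice row none
            (some ((PySem.List.pyGetD seg 0 []).length : Int)))))
          r []) (min (c + n) ((PySem.List.pyGetD seg 0 []).length : Int)) 0
      - PySem.List.pyGetD (PySem.List.pyGetD
          (seg.map (fun row => pvPrefixZeros (PySem.List.slice row none
            (some ((PySem.List.pyGetD seg 0 []).length : Int)))))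
          r []) c 0
    else 0)

-- B's per-cell update, keyed on the enumerated (row index, (column index, value)) triple
def pvBUpdE (seg : List (List Int)) (n value : Int)
    (img : List (List (List Int))) (x : Int × Int × Int) : List (List (List Int)) :=
  if x.2.2 = 0 ∨ x.2.2 = 1 then img
  else if pvT seg n x.1 x.2.1 = 0 then img
  else pvSetIdx img x.1 (fun row => pvSetIdx row x.2.1 (pvUpdPx (pvT seg n x.1 x.2.1) value))

-- the same update keyed on the coordinates alone (the value is looked up)
def pvBUpd (seg : List (List Int)) (n value : Int)
    (img : List (List (List Int))) (rc : Int × Int) : List (List (List Int)) :=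
  if pvSegAt seg rc.1 rc.2 = 0 ∨ pvSegAt seg rc.1 rc.2 = 1 then img
  else if pvT seg n rc.1 rc.2 = 0 then img
  else pvSetIdx img rc.1 (fun row => pvSetIdx row rc.2 (pvUpdPx (pvT seg n rc.1 rc.2) value))

-- the (index, value) triples B's two enumerate loops traverse
def pvTriples (seg : List (List Int)) : List (Int × Int × Int) :=
  (PySem.List.enumerate seg 0).flatMap (fun rrow =>
    (PySem.List.enumerate (PySem.List.slice rrow.2 none
      (some ((PySem.List.pyGetD seg 0 []).length : Int))) 0).map (fun cv => (rrow.1, cv)))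

-- the coordinates B visits
def pvPairs (seg : List (List Int)) : List (Int × Int) :=
  (pvTriples seg).map (fun x => (x.1, x.2.1))

def pvCellApply (seg : List (List Int)) (n value : Int) (rr cc : Nat) (px : List Int) : List Int :=
  if pvSegAt seg (rr : Int) (cc : Int) = 0 ∨ pvSegAt seg (rr : Int) (cc : Int) = 1 then px
  else if pvT seg n (rr : Int) (cc : Int) = 0 then px
  else pvUpdPx (pvT seg n (rr : Int) (cc : Int)) value px

lemma pvUpdPx_nil (t value : Int) : pvUpdPx t value [] = [] := rfl

lemma pvUpdPx_cons (t value p0 p1 p2 : Int) (rest : List Int) :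
    pvUpdPx t value (p0 :: p1 :: p2 :: rest)
      = pvChan t value p0 :: pvChan t value p1 :: pvChan t value p2 :: rest := rfl

-- B is the fold of pvBUpdE over the enumerated triples
lemma pvB_eq_foldE (seg : List (List Int)) (color : List (List (List Int))) (value n : Int) :
    line_effect_alt seg color value n
      = if seg.length = 0 ∨ n ≤ 0 then color
        else (pvTriples seg).foldl (pvBUpdE seg n value) color := by
  unfold line_effect_alt pvTriples
  split_ifs with h
  · rfl
  · rw [List.foldl_flatMap]
    simp only [List.foldl_map]
    rfl

-- members of pvTriples carry the actual seg value at their coordinates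
lemma pv_triples_mem (seg : List (List Int)) (x : Int × Int × Int) (hx : x ∈ pvTriples seg) :
    0 ≤ x.1 ∧ x.1 < (seg.length : Int) ∧ 0 ≤ x.2.1 ∧
    x.2.1 < (((seg.getD x.1.toNat []).take (PySem.List.pyGetD seg 0 []).length).length : Int) ∧
    x.2.2 = pvSegAt seg x.1 x.2.1 := by
  unfold pvTriples at hx
  simp only [List.mem_flatMap, List.mem_map] at hx
  obtain ⟨rrow, hr, cv, hc, hxeq⟩ := hx
  rw [PySem.List.mem_enumerate_iff] at hr
  obtain ⟨k, hk, hreq⟩ := hr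
  subst hreq
  rw [PySem.List.mem_enumerate_iff] at hc
  obtain ⟨k', hk', hceq⟩ := hc
  subst hxeq
  subst hceq
  simp only [zero_add, Int.toNat_natCast]
  have hgd : seg.getD k [] = seg[k] := by
    rw [List.getD_eq_getElem?_getD, List.getElem?_eq_getElem hk]
    rfl
  have hk2 : k' < ((seg[k]).take (PySem.List.pyGetD seg 0 []).length).length := by
    have h := hk'
    simp only [PySem.List.slice_to_natCast] at h
    exact h
  have hk3 : k' < (seg[k]).length := by
    rw [List.length_take] at hk2
    omega
  refine ⟨by omega, by exact_mod_cast hk, by omega, ?_, ?_⟩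
  · rw [hgd]
    exact_mod_cast hk2
  · simp only [PySem.List.slice_to_natCast, List.getElem_take]
    rw [pvSegAt_getD seg _ _ (by omega) (by omega), Int.toNat_natCast, Int.toNat_natCast, hgd,
      List.getD_eq_getElem?_getD, List.getElem?_eq_getElem hk3, Option.getD_some]

-- hence folding pvBUpdE over the triples is folding pvBUpd over the coordinates
lemma pvB_fold_pairs (seg : List (List Int)) (color : List (List (List Int))) (value n : Int) :
    (pvTriples seg).foldl (pvBUpdE seg n value) color
      = (pvPairs seg).foldl (pvBUpd seg n value) color := by
  unfold pvPairs
  rw [List.foldl_map]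
  apply PySem.List.foldl_congr_mem'
  intro x hx acc
  obtain ⟨_, _, _, _, hv⟩ := pv_triples_mem seg x hx
  unfold pvBUpdE pvBUpd
  rw [hv]

-- pvPairs membership: exactly the coordinates with a cell in the first W columns of a real row
lemma pv_mem_pairs (seg : List (List Int)) (rr cc : Nat) :
    ((rr : Int), (cc : Int)) ∈ pvPairs seg
      ↔ rr < seg.length ∧ cc < (seg.getD 0 []).length ∧ cc < (seg.getD rr []).length := by
  have hW0 : PySem.List.pyGetD seg 0 [] = seg.getD 0 [] := by
    rw [PySem.List.pyGetD_of_nonneg seg _ (by omega)]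
    rfl
  constructor
  · intro h
    unfold pvPairs at h
    rw [List.mem_map] at h
    obtain ⟨x, hx, hxeq⟩ := h
    obtain ⟨h1, h2, h3, h4, _⟩ := pv_triples_mem seg x hx
    rw [Prod.ext_iff] at hxeq
    obtain ⟨he1, he2⟩ := hxeq
    simp only at he1 he2
    rw [he1, Int.toNat_natCast] at h4
    rw [he2] at h4
    rw [List.length_take, hW0] at h4
    have h4' : cc < min (seg.getD 0 []).length (seg.getD rr []).length := by exact_mod_cast h4
    rw [he1] at h2
    exact ⟨by exact_mod_cast h2, by omega, by omega⟩
  · rintro ⟨h1, h2, h3⟩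
    have h2' : cc < (PySem.List.pyGetD seg 0 []).length := by rw [hW0]; exact h2
    have hval : pvSegAt seg (rr : Int) (cc : Int)
        = (PySem.List.slice (seg.getD rr []) none
            (some ((PySem.List.pyGetD seg 0 []).length : Int))).getD cc 0 := by
      rw [PySem.List.slice_to_natCast,
        pvSegAt_getD seg _ _ (by omega) (by omega), Int.toNat_natCast, Int.toNat_natCast]
      rw [List.getD_eq_getElem?_getD (l := (seg.getD rr []).take (PySem.List.pyGetD seg 0 []).length),
        List.getElem?_take_of_lt (by omega), ← List.getD_eq_getElem?_getD]
    unfold pvPairs pvTriples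
    simp only [List.mem_map, List.mem_flatMap]
    have hlt : cc < (PySem.List.slice (seg.getD rr []) none
        (some ((PySem.List.pyGetD seg 0 []).length : Int))).length := by
      rw [PySem.List.slice_to_natCast, List.length_take]
      omega
    refine ⟨((rr : Int), ((cc : Int), pvSegAt seg (rr : Int) (cc : Int))),
      ⟨((rr : Int), seg.getD rr []), ?_, ((cc : Int), pvSegAt seg (rr : Int) (cc : Int)), ?_, rfl⟩, rfl⟩
    · rw [PySem.List.mem_enumerate_iff]
      refine ⟨rr, h1, ?_⟩
      rw [List.getD_eq_getElem?_getD, List.getElem?_eq_getElem h1]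
      simp
    · rw [PySem.List.mem_enumerate_iff]
      refine ⟨cc, hlt, ?_⟩
      rw [Prod.ext_iff]
      refine ⟨by simp, ?_⟩
      simp only
      rw [hval, List.getD_eq_getElem?_getD, List.getElem?_eq_getElem hlt, Option.getD_some]

-- pvPairs has no duplicate coordinates
lemma pv_nodup_flatMap_keyed (l : List (Int × List Int)) (g : Int × List Int → List (Int × Int))
    (hl : (l.map Prod.fst).Nodup)
    (hg1 : ∀ a ∈ l, (g a).Nodup)
    (hg2 : ∀ a ∈ l, ∀ p ∈ g a, p.1 = a.1) : (l.flatMap g).Nodup := by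
  induction l with
  | nil => simp
  | cons a l ih =>
    rw [List.flatMap_cons]
    rw [List.map_cons, List.nodup_cons] at hl
    refine List.Nodup.append (hg1 a List.mem_cons_self)
      (ih hl.2 (fun b hb => hg1 b (List.mem_cons_of_mem a hb))
        (fun b hb => hg2 b (List.mem_cons_of_mem a hb))) ?_
    intro p hp hq
    rw [List.mem_flatMap] at hq
    obtain ⟨b, hb, hpb⟩ := hq
    have h1 := hg2 a List.mem_cons_self p hp
    have h2 := hg2 b (List.mem_cons_of_mem a hb) p hpb
    apply hl.1
    have hab : a.1 = b.1 := by rw [← h1, h2]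
    rw [hab]
    exact List.mem_map_of_mem hb

lemma pv_pairs_nodup (seg : List (List Int)) : (pvPairs seg).Nodup := by
  unfold pvPairs pvTriples
  rw [List.map_flatMap]
  apply pv_nodup_flatMap_keyed
  · rw [show (Prod.fst : Int × List Int → Int) = (fun p : Int × List Int => p.1) from rfl,
      PySem.List.map_fst_enumerate]
    exact PySem.List.nodup_pyRange_one _ _
  · intro a _
    rw [List.map_map]
    have : ((fun x : Int × Int × Int => (x.1, x.2.1)) ∘ fun cv : Int × Int => (a.1, cv))
        = (fun c : Int => (a.1, c)) ∘ (Prod.fst : Int × Int → Int) := rfl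
    rw [this, ← List.map_map,
      show ((Prod.fst : Int × Int → Int)) = (fun p : Int × Int => p.1) from rfl,
      PySem.List.map_fst_enumerate]
    exact (PySem.List.nodup_pyRange_one _ _).map
      (fun x y h => by rw [Prod.ext_iff] at h; exact h.2)
  · intro a _ p hp
    rw [List.map_map, List.mem_map] at hp
    obtain ⟨cv, _, hpe⟩ := hp
    rw [← hpe]
    rfl

-- value of the truncated column list at a row index
lemma pv_colL_getD (seg : List (List Int)) (cc : Nat) (x : Int)
    (hx0 : 0 ≤ x) (hx299 : x < 299) (hxH : x < (seg.length : Int)) :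
    PySem.List.pyGetD ((PySem.List.slice seg none (some 299)).map
        (fun row => PySem.List.pyGetD row ((cc : Nat) : Int) 0)) x 0
      = pvSegAt seg x (cc : Int) := by
  have h299 : PySem.List.slice seg none (some 299) = seg.take 299 := by
    rw [show (299 : Int) = ((299 : Nat) : Int) from rfl, PySem.List.slice_to_natCast]
  rw [h299, PySem.List.pyGetD_of_nonneg _ _ hx0, List.getD_eq_getElem?_getD,
    List.getElem?_map, List.getElem?_take_of_lt (by omega),
    List.getElem?_eq_getElem (show x.toNat < seg.length by omega)]
  simp only [Option.map_some, Option.getD_some]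
  unfold pvSegAt
  rw [PySem.List.pyGetD_of_nonneg _ _ hx0]
  congr 1
  rw [List.getD_eq_getElem?_getD, List.getElem?_eq_getElem (show x.toNat < seg.length by omega),
    Option.getD_some]

-- pvT equals the window zero-counts A scatters, under the widths Pre_ guarantees
lemma pvT_eq_counts (seg : List (List Int)) (n : Int) (rr cc : Nat) (hn : 1 ≤ n)
    (hrr : rr < seg.length) (hcc : cc < (seg.getD 0 []).length)
    (hlen : 1 ≤ cc → (seg.getD 0 []).length ≤ (seg.getD rr []).length) :
    pvT seg n (rr : Int) (cc : Int)
      = (((if (rr : Int) ≤ 298 then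
            (PySem.List.pyRange (max ((rr : Int) - n + 1) 0) ((rr : Int) + 1) 1).countP
              (fun i => decide (pvSegAt seg i (cc : Int) = 0)) else 0)
        + (if (0 : Int) < (cc : Int) then
            (PySem.List.pyRange (cc : Int) (min ((cc : Int) + n) ((seg.getD 0 []).length : Int)) 1).countP
              (fun j => decide (pvSegAt seg (rr : Int) j = 0)) else 0) : Nat) : Int) := by
  have hW0 : PySem.List.pyGetD seg 0 [] = seg.getD 0 [] := by
    rw [PySem.List.pyGetD_of_nonneg seg _ (by omega)]
    rfl
  unfold pvT
  rw [hW0]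
  set Nv := (PySem.List.pyRange (max ((rr : Int) - n + 1) 0) ((rr : Int) + 1) 1).countP
      (fun i => decide (pvSegAt seg i (cc : Int) = 0)) with hNv
  set Nh := (PySem.List.pyRange (cc : Int)
      (min ((cc : Int) + n) ((seg.getD 0 []).length : Int)) 1).countP
      (fun j => decide (pvSegAt seg (rr : Int) j = 0)) with hNh
  have hcp : PySem.List.pyGetD
      ((PySem.List.pyRange 0 ((seg.getD 0 []).length : Int) 1).map (fun c' =>
        pvPrefixZeros ((PySem.List.slice seg none (some 299)).map
          (fun row => PySem.List.pyGetD row c' 0)))) (cc : Int) []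
      = pvPrefixZeros ((PySem.List.slice seg none (some 299)).map
          (fun row => PySem.List.pyGetD row ((cc : Nat) : Int) 0)) :=
    PySem.List.pyGetD_map_pyRange_of_nonneg _ _ _ _ (by omega) (by exact_mod_cast hcc)
  have hcolLen : ((PySem.List.slice seg none (some 299)).map
      (fun row => PySem.List.pyGetD row ((cc : Nat) : Int) 0)).length = min 299 seg.length := by
    rw [show (299 : Int) = ((299 : Nat) : Int) from rfl, PySem.List.slice_to_natCast,
      List.length_map, List.length_take]
  have hvert : (if (rr : Int) ≤ 298 then
        PySem.List.pyGetD (PySem.List.pyGetD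
          ((PySem.List.pyRange 0 ((seg.getD 0 []).length : Int) 1).map (fun c' =>
            pvPrefixZeros ((PySem.List.slice seg none (some 299)).map
              (fun row => PySem.List.pyGetD row c' 0)))) (cc : Int) []) ((rr : Int) + 1) 0
        - PySem.List.pyGetD (PySem.List.pyGetD
          ((PySem.List.pyRange 0 ((seg.getD 0 []).length : Int) 1).map (fun c' =>
            pvPrefixZeros ((PySem.List.slice seg none (some 299)).map
              (fun row => PySem.List.pyGetD row c' 0)))) (cc : Int) []) (max ((rr : Int) - n + 1) 0) 0
      else 0) = (if (rr : Int) ≤ 298 then (Nv : Int) else 0) := by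
    by_cases h298 : (rr : Int) ≤ 298
    · rw [if_pos h298, if_pos h298, hcp,
        pv_pref_window _ (max ((rr : Int) - n + 1) 0) ((rr : Int) + 1)
          (le_max_right _ _) (by omega)
          (by rw [hcolLen]
              have h1 : (rr : Int) < (seg.length : Int) := by exact_mod_cast hrr
              push_cast
              omega)]
      rw [hNv]
      congr 1
      apply List.countP_congr
      intro x hx
      rw [PySem.List.mem_pyRange_one] at hx
      rw [pv_colL_getD seg cc x (by omega) (by omega)
        (by have : (rr : Int) < (seg.length : Int) := by exact_mod_cast hrr
            omega)]
    · rw [if_neg h298, if_neg h298]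
  have hhor : (if (1 : Int) ≤ (cc : Int) then
        PySem.List.pyGetD (PySem.List.pyGetD
          (seg.map (fun row => pvPrefixZeros (PySem.List.slice row none
            (some ((seg.getD 0 []).length : Int))))) (rr : Int) [])
          (min ((cc : Int) + n) ((seg.getD 0 []).length : Int)) 0
        - PySem.List.pyGetD (PySem.List.pyGetD
          (seg.map (fun row => pvPrefixZeros (PySem.List.slice row none
            (some ((seg.getD 0 []).length : Int))))) (rr : Int) []) ((cc : Int)) 0
      else 0) = (if (0 : Int) < (cc : Int) then (Nh : Int) else 0) := by
    by_cases hc1 : (1 : Int) ≤ (cc : Int)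
    · rw [if_pos hc1, if_pos (by omega : (0 : Int) < (cc : Int))]
      have hlen' : (seg.getD 0 []).length ≤ (seg.getD rr []).length := hlen (by omega)
      have hrp : PySem.List.pyGetD
          (seg.map (fun row => pvPrefixZeros
              (PySem.List.slice row none (some ((seg.getD 0 []).length : Int))))) (rr : Int) []
          = pvPrefixZeros (PySem.List.slice (seg.getD rr [])
              none (some ((seg.getD 0 []).length : Int))) := by
        rw [PySem.List.pyGetD_natCast, pv_getD_map seg _ rr hrr []]
      rw [hrp, pv_slice_take]
      have htakeLen : ((seg.getD rr []).take (seg.getD 0 []).length).length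
          = (seg.getD 0 []).length := by
        rw [List.length_take]
        omega
      rw [pv_pref_window _ (cc : Int)
          (min ((cc : Int) + n) ((seg.getD 0 []).length : Int))
          (by omega)
          (by have : (cc : Int) < ((seg.getD 0 []).length : Int) := by exact_mod_cast hcc
              omega)
          (by rw [htakeLen]; omega)]
      rw [hNh]
      congr 1
      apply List.countP_congr
      intro x hx
      rw [PySem.List.mem_pyRange_one] at hx
      have hxW : x.toNat < (seg.getD 0 []).length := by omega
      rw [PySem.List.pyGetD_of_nonneg _ _ (by omega),
        pvSegAt_getD seg _ _ (by omega) (by omega),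
        Int.toNat_natCast]
      have hAB : (List.take (seg.getD 0 []).length (seg.getD rr [])).getD
            x.toNat 0 = (seg.getD rr []).getD x.toNat 0 := by
        rw [List.getD_eq_getElem?_getD
            (l := List.take (seg.getD 0 []).length (seg.getD rr [])),
          List.getElem?_take_of_lt hxW, ← List.getD_eq_getElem?_getD]
      rw [hAB]
    · rw [if_neg hc1, if_neg (by omega : ¬ ((0 : Int) < (cc : Int)))]
  rw [hvert, hhor]
  by_cases hP : (rr : Int) ≤ 298 <;> by_cases hQ : (0 : Int) < (cc : Int) <;>
    simp [hP, hQ]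

-- ===== pointwise behaviour of B's fold =====

lemma pxAt_setpx (F : List Int → List Int) (hF : F [] = [])
    (img : List (List (List Int))) (a b : Int) (rr cc : Nat) :
    pxAt (pvSetIdx img a (fun row => pvSetIdx row b F)) rr cc
      = if a = (rr : Int) ∧ b = (cc : Int) then F (pxAt img rr cc) else pxAt img rr cc := by
  unfold pxAt
  rw [pvSetIdx_getD img a _ rr [] (pvSetIdx_nil b F)]
  by_cases har : a = (rr : Int)
  · rw [if_pos har, pvSetIdx_getD _ _ _ _ _ hF]
    by_cases hbc : b = (cc : Int)
    · rw [if_pos hbc, if_pos ⟨har, hbc⟩]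
    · rw [if_neg hbc, if_neg (by tauto)]
  · rw [if_neg har, if_neg (by tauto)]

lemma pvBUpd_pxAt (seg : List (List Int)) (n value : Int) (img : List (List (List Int)))
    (rc : Int × Int) (rr cc : Nat) :
    pxAt (pvBUpd seg n value img rc) rr cc
      = if rc = ((rr : Int), (cc : Int)) then pvCellApply seg n value rr cc (pxAt img rr cc)
        else pxAt img rr cc := by
  obtain ⟨a, b⟩ := rc
  unfold pvBUpd pvCellApply
  by_cases h : (a, b) = ((rr : Int), (cc : Int))
  · rw [Prod.mk.injEq] at h
    obtain ⟨ha, hb⟩ := h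
    subst ha
    subst hb
    rw [if_pos rfl]
    split_ifs with h1 h2
    · rfl
    · rfl
    · rw [pxAt_setpx _ (pvUpdPx_nil _ _), if_pos ⟨rfl, rfl⟩]
  · rw [if_neg h]
    split_ifs with h1 h2
    · rfl
    · rfl
    · rw [pxAt_setpx _ (pvUpdPx_nil _ _), if_neg (by rw [Prod.mk.injEq] at h; tauto)]

lemma pv_foldB_pxAt (seg : List (List Int)) (n value : Int) :
    ∀ (L : List (Int × Int)), L.Nodup → ∀ (img : List (List (List Int))) (rr cc : Nat),
      pxAt (L.foldl (pvBUpd seg n value) img) rr cc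
        = if ((rr : Int), (cc : Int)) ∈ L then pvCellApply seg n value rr cc (pxAt img rr cc)
          else pxAt img rr cc := by
  intro L
  induction L with
  | nil => intro _ img rr cc; simp
  | cons t L ih =>
    intro hnd img rr cc
    rw [List.foldl_cons, ih (List.nodup_cons.mp hnd).2]
    by_cases h : ((rr : Int), (cc : Int)) = t
    · have hnm : ((rr : Int), (cc : Int)) ∉ L := h ▸ (List.nodup_cons.mp hnd).1
      have hstep : pxAt (pvBUpd seg n value img t) rr cc
          = pvCellApply seg n value rr cc (pxAt img rr cc) := by
        rw [pvBUpd_pxAt, if_pos h.symm]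
      rw [if_neg hnm, hstep, if_pos (by rw [h]; exact List.mem_cons_self)]
    · have hstep : pxAt (pvBUpd seg n value img t) rr cc = pxAt img rr cc := by
        rw [pvBUpd_pxAt, if_neg (fun hh => h hh.symm)]
      rw [hstep, if_congr (Iff.intro (List.mem_cons_of_mem t)
        (fun hm => (List.mem_cons.mp hm).resolve_left h)) rfl rfl]

lemma pv_foldB_length (seg : List (List Int)) (n value : Int) (L : List (Int × Int))
    (img : List (List (List Int))) :
    (L.foldl (pvBUpd seg n value) img).length = img.length := by
  induction L generalizing img with
  | nil => rfl
  | cons t L ih =>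
    rw [List.foldl_cons, ih]
    unfold pvBUpd
    split_ifs <;> simp [pvSetIdx_length]

lemma pv_foldB_rowlen (seg : List (List Int)) (n value : Int) (L : List (Int × Int))
    (img : List (List (List Int))) (r : Nat) :
    ((L.foldl (pvBUpd seg n value) img).getD r []).length = (img.getD r []).length := by
  induction L generalizing img with
  | nil => rfl
  | cons t L ih =>
    rw [List.foldl_cons, ih]
    unfold pvBUpd
    split_ifs with h1 h2
    · rfl
    · rfl
    · rw [pvSetIdx_getD img t.1 _ r [] (pvSetIdx_nil _ _)]
      split_ifs <;> simp [pvSetIdx_length]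

-- a nonzero hit count yields the Pre_'s closed-form hit condition
lemma pv_hit_of_counts (seg : List (List Int)) (n : Int) (rr cc : Nat)
    (hrr : rr < seg.length) (hcc : cc < (seg.getD 0 []).length)
    (hv01 : pvSegAt seg (rr : Int) (cc : Int) ≠ 0 ∧ pvSegAt seg (rr : Int) (cc : Int) ≠ 1)
    (hN : (if (rr : Int) ≤ 298 then
            (PySem.List.pyRange (max ((rr : Int) - n + 1) 0) ((rr : Int) + 1) 1).countP
              (fun i => decide (pvSegAt seg i (cc : Int) = 0)) else 0)
        + (if (0 : Int) < (cc : Int) then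
            (PySem.List.pyRange (cc : Int) (min ((cc : Int) + n) ((seg.getD 0 []).length : Int)) 1).countP
              (fun j => decide (pvSegAt seg (rr : Int) j = 0)) else 0) ≠ 0) :
    pvHitAt seg n rr cc := by
  have hseg0 : pvSegAt seg (rr : Int) (cc : Int) = (seg.getD rr []).getD cc 0 := by
    rw [pvSegAt_getD seg _ _ (by omega) (by omega), Int.toNat_natCast, Int.toNat_natCast]
  refine ⟨by rw [← hseg0]; exact hv01.1, by rw [← hseg0]; exact hv01.2, ?_⟩
  have hor : (if (rr : Int) ≤ 298 then
        (PySem.List.pyRange (max ((rr : Int) - n + 1) 0) ((rr : Int) + 1) 1).countP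
          (fun i => decide (pvSegAt seg i (cc : Int) = 0)) else 0) ≠ 0
      ∨ (if (0 : Int) < (cc : Int) then
        (PySem.List.pyRange (cc : Int) (min ((cc : Int) + n) ((seg.getD 0 []).length : Int)) 1).countP
          (fun j => decide (pvSegAt seg (rr : Int) j = 0)) else 0) ≠ 0 := by
    omega
  rcases hor with hv | hh
  · left
    split_ifs at hv with hP
    · refine ⟨hP, ?_⟩
      have hex : ∃ x ∈ PySem.List.pyRange (max ((rr : Int) - n + 1) 0) ((rr : Int) + 1) 1,
          decide (pvSegAt seg x (cc : Int) = 0) = true := by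
        by_contra hc
        push_neg at hc
        exact hv (List.countP_eq_zero.mpr (by simpa using hc))
      obtain ⟨x, hxmem, hxp⟩ := hex
      rw [PySem.List.mem_pyRange_one] at hxmem
      have hx0 : 0 ≤ x := le_trans (le_max_right _ _) hxmem.1
      refine ⟨x.toNat, by omega, by omega, ?_⟩
      have := of_decide_eq_true hxp
      rw [pvSegAt_getD seg _ _ hx0 (by omega), Int.toNat_natCast] at this
      exact this
    · omega
  · right
    split_ifs at hh with hQ
    · refine ⟨by omega, ?_⟩
      have hex : ∃ x ∈ PySem.List.pyRange (cc : Int)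
          (min ((cc : Int) + n) ((seg.getD 0 []).length : Int)) 1,
          decide (pvSegAt seg (rr : Int) x = 0) = true := by
        by_contra hc
        push_neg at hc
        exact hh (List.countP_eq_zero.mpr (by simpa using hc))
      obtain ⟨x, hxmem, hxp⟩ := hex
      rw [PySem.List.mem_pyRange_one] at hxmem
      have hx0 : 0 ≤ x := le_trans (by omega) hxmem.1
      refine ⟨x.toNat, by omega, by omega, by omega, ?_⟩
      have := of_decide_eq_true hxp
      rw [pvSegAt_getD seg _ _ (by omega) hx0, Int.toNat_natCast] at this
      exact this
    · omega

theorem pv_main (seg_img : List (List Int)) (color_img : List (List (List Int))) (value n : Int)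
    (hpre : Pre_line_effect seg_img color_img value n) :
    line_effect seg_img color_img value n = line_effect_alt seg_img color_img value n := by
  rw [pvA_eq_fold, pvB_eq_foldE, pvB_fold_pairs]
  by_cases htriv : n ≤ 0 ∨ seg_img = []
  · rw [pv_targets_nil_of seg_img _ n htriv,
      if_pos (by rcases htriv with h | h
                 · exact Or.inr h
                 · exact Or.inl (by simp [h]))]
    rfl
  · push_neg at htriv
    obtain ⟨hn', hseg⟩ := htriv
    have hn : 1 ≤ n := by omega
    have hH0 : 0 < seg_img.length := List.length_pos_iff.mpr hseg
    unfold Pre_line_effect at hpre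
    rcases hpre with h | h | hpre
    · omega
    · exact absurd h hseg
    obtain ⟨hrow1, hrow2, hzero, hshape⟩ := hpre
    have hW0 : PySem.List.pyGetD seg_img 0 [] = seg_img.getD 0 [] := by
      rw [PySem.List.pyGetD_of_nonneg seg_img _ (by omega)]
      rfl
    rw [if_neg (by push_neg; exact ⟨by omega, by omega⟩)]
    have hnd : (pvPairs seg_img).Nodup := pv_pairs_nodup seg_img
    apply pv_list_eq_of_getD _ _ []
    · rw [pv_fold_length, pv_foldB_length]
    · intro rr
      apply pv_list_eq_of_getD _ _ []
      · rw [pv_fold_rowlen, pv_foldB_rowlen]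
      · intro cc
        rw [pxAt_def, pxAt_def, pv_fold_pxAt, pv_foldB_pxAt seg_img n value _ hnd]
        by_cases hin : rr < seg_img.length ∧ cc < (seg_img.getD 0 []).length
          ∧ cc < (seg_img.getD rr []).length
        · obtain ⟨hrr, hcc, hcr⟩ := hin
          rw [if_pos ((pv_mem_pairs seg_img rr cc).mpr ⟨hrr, hcc, hcr⟩)]
          apply Eq.symm
          unfold pvCellApply
          have hlen : 1 ≤ cc → (seg_img.getD 0 []).length ≤ (seg_img.getD rr []).length := by
            intro hc1
            by_cases h299 : rr < 299
            · exact hrow1 rr (by omega)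
            · rcases hrow2 rr (by omega) hrr with h | h
              · exact h
              · omega
          rw [hW0, pvT_eq_counts seg_img n rr cc hn hrr hcc hlen]
          by_cases hv : pvSegAt seg_img (rr : Int) (cc : Int) = 0
              ∨ pvSegAt seg_img (rr : Int) (cc : Int) = 1
          · rw [if_pos hv, pv_count_targets seg_img n _ rr cc hrr (by exact_mod_cast hcc) hn,
              if_neg (by tauto), Function.iterate_zero_apply]
          · rw [if_neg hv]
            have hv01 : pvSegAt seg_img (rr : Int) (cc : Int) ≠ 0
                ∧ pvSegAt seg_img (rr : Int) (cc : Int) ≠ 1 := by tauto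
            rw [pv_count_targets seg_img n _ rr cc hrr (by exact_mod_cast hcc) hn,
              if_pos hv01]
            set N := (if (rr : Int) ≤ 298 then
                (PySem.List.pyRange (max ((rr : Int) - n + 1) 0) ((rr : Int) + 1) 1).countP
                  (fun i => decide (pvSegAt seg_img i (cc : Int) = 0)) else 0)
              + (if (0 : Int) < (cc : Int) then
                (PySem.List.pyRange (cc : Int)
                  (min ((cc : Int) + n) ((seg_img.getD 0 []).length : Int)) 1).countP
                  (fun j => decide (pvSegAt seg_img (rr : Int) j = 0)) else 0) with hNdef
            by_cases hN : N = 0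
            · rw [hN, Nat.cast_zero, if_pos rfl, Function.iterate_zero_apply]
            · rw [if_neg (by exact_mod_cast hN)]
              have hHit : pvHitAt seg_img n rr cc :=
                pv_hit_of_counts seg_img n rr cc hrr hcc hv01 (by omega)
              have h3 : 3 ≤ ((color_img.getD rr []).getD cc []).length :=
                (hshape rr hrr cc hcc hHit).2.2
              rw [pxAt_def] at h3
              obtain ⟨p0, t0, h0⟩ := List.exists_cons_of_ne_nil
                (l := pxAt color_img rr cc) (by intro h; rw [h] at h3; simp at h3)
              obtain ⟨p1, t1, h1⟩ := List.exists_cons_of_ne_nil (l := t0)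
                (by intro h; rw [h0, h] at h3; simp at h3)
              obtain ⟨p2, t2, h2⟩ := List.exists_cons_of_ne_nil (l := t1)
                (by intro h; rw [h0, h1, h] at h3; simp at h3)
              rw [h0, h1, h2, pv_upd3_iterate, pvUpdPx_cons]
              simp only [pvChan_eq_iterate]
        · rw [if_neg (fun hm => hin ((pv_mem_pairs seg_img rr cc).mp hm)), hW0]
          by_cases hbound : rr < seg_img.length ∧ cc < (seg_img.getD 0 []).length
          · -- the cell is inside the scanned rectangle but past the end of its (ragged) row:
            -- its seg value defaults to 0, so A never darkens it either
            obtain ⟨hrr, hcc⟩ := hbound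
            have hcr : (seg_img.getD rr []).length ≤ cc := by
              by_contra hc
              exact hin ⟨hrr, hcc, by omega⟩
            have hz : pvSegAt seg_img (rr : Int) (cc : Int) = 0 := by
              rw [pvSegAt_getD seg_img _ _ (by omega) (by omega),
                Int.toNat_natCast, Int.toNat_natCast, List.getD_eq_getElem?_getD,
                List.getElem?_eq_none (by omega)]
              rfl
            rw [pv_count_targets seg_img n _ rr cc hrr (by exact_mod_cast hcc) hn,
              if_neg (by simp [hz]), Function.iterate_zero_apply]
          · rw [pv_count_zero_outside seg_img n hzero rr cc
              (by by_contra hc; push_neg at hc; exact hbound ⟨by omega, by omega⟩),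
              Function.iterate_zero_apply]

-- ===== VERDICT (by name: the statement is the Claim_ definition above) =====
theorem line_effect_spec : Claim_equal_line_effect := by
  intro seg color value n _ hpre
  unfold Spec_line_effect
  exact pv_main seg color value n hpre
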